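-- pv_equiv track=rewrite | github.com/hydro-kun/2023winter-jgqj-NLPhomework | Code_Build_QA_System/Generate_Answer.py | optimized_answer_format
-- ===== SOURCE A (Python) =====
-- def optimized_answer_format(answer, answer_content, Category) :
--     if Category == '电影的编剧' or Category == '电影的主演' :
--         for i, item in enumerate(answer_content):
--             if i == len(answer_content) - 1:        # 最后一个元素
--                 answer += item['p.Ch_Name']
--             elif i == len(answer_content) - 2:      # 倒数第二个元素
--                 answer += item['p.Ch_Name'] + '和'
--             else:
--                 answer += item['p.Ch_Name'] + '、'
--         return answer
--     elif Category == '电影的类型' :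
--         for i, item in enumerate(answer_content):
--             if i == len(answer_content) - 1:        # 最后一个元素
--                 answer += item['n.Name']
--             elif i == len(answer_content) - 2:      # 倒数第二个元素
--                 answer += item['n.Name'] + '和'
--             else:
--                 answer += item['n.Name'] + '、'
--         return answer
--     else:
--         for i, item in enumerate(answer_content):
--             if i == len(answer_content) - 1:        # 最后一个元素
--                 answer += item['m.Name']
--             elif i == len(answer_content) - 2:      # 倒数第二个元素
--                 answer += item['m.Name'] + '和'
--             else:
--                 answer += item['m.Name'] + '、'
--         return answer
-- ===== SOURCE B (Python) =====
-- def optimized_answer_format(answer, answer_content, Category):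
--     # Select the lookup key once, extract all names, then join with Chinese separators.
--     if Category == '电影的编剧' or Category == '电影的主演':
--         key = 'p.Ch_Name'
--     elif Category == '电影的类型':
--         key = 'n.Name'
--     else:
--         key = 'm.Name'
--     names = [item[key] for item in answer_content]
--     if not names:
--         return answer
--     if len(names) == 1:
--         return answer + names[0]
--     return answer + '、'.join(names[:-1]) + '和' + names[-1]
-- ===== Notes on version B (the rewrite author's own statement) =====
-- stated objective: simpler
-- what changed: Replaces the three duplicated per-element positional-branching loops by a single key selection, a list of extracted names, and a slice/join composition ('、'.join on all but the last, '和' before the last).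
import Mathlib
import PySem

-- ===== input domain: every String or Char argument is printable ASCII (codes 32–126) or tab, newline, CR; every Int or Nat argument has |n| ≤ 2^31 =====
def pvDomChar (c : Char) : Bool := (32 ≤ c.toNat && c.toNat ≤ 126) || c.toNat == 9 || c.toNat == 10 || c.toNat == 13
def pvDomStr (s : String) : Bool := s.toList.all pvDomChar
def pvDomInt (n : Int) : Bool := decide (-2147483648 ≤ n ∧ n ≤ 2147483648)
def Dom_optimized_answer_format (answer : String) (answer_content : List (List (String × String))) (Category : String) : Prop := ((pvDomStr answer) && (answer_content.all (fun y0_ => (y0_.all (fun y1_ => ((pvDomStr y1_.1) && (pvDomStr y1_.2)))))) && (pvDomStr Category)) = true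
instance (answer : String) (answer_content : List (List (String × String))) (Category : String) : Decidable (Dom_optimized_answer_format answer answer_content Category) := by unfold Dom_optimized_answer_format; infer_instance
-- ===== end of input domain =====

-- B replaces A's three duplicated positional-branching loops by one key selection plus a
-- slice/join composition; same cost, simpler (objective: simpler).

-- ===== PORT A =====
-- A's 'for i, item in enumerate(answer_content)' loop body (identical in all three branches
-- except for the key literal): i compared against len-1 / len-2, appending '和' / '、'.
-- item[key] is ported as Dict.getD with default ""; Pre_ excludes the KeyError inputs,
-- so the default is never reached on admitted inputs.
def pvLoopA (key : String) (n : Nat) : String → Nat → List (List (String × String)) → String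
  | acc, _, [] => acc
  | acc, i, item :: rest =>
      if i = n - 1 then
        pvLoopA key n (acc ++ PySem.Dict.getD (PySem.Dict.mk item) key "") (i + 1) rest
      else if i = n - 2 then
        pvLoopA key n (acc ++ (PySem.Dict.getD (PySem.Dict.mk item) key "" ++ "和")) (i + 1) rest
      else
        pvLoopA key n (acc ++ (PySem.Dict.getD (PySem.Dict.mk item) key "" ++ "、")) (i + 1) rest

def optimized_answer_format (answer : String) (answer_content : List (List (String × String))) (Category : String) : String :=
  if Category == "电影的编剧" || Category == "电影的主演" then
    pvLoopA "p.Ch_Name" answer_content.length answer 0 answer_content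
  else if Category == "电影的类型" then
    pvLoopA "n.Name" answer_content.length answer 0 answer_content
  else
    pvLoopA "m.Name" answer_content.length answer 0 answer_content

-- ===== PORT B =====
def optimized_answer_format_alt (answer : String) (answer_content : List (List (String × String))) (Category : String) : String :=
  let key := if Category == "电影的编剧" || Category == "电影的主演" then "p.Ch_Name"
             else if Category == "电影的类型" then "n.Name"
             else "m.Name"
  let names := answer_content.map (fun item => PySem.Dict.getD (PySem.Dict.mk item) key "")
  if names.isEmpty then answer
  else if names.length == 1 then answer ++ names.headD ""
  else answer ++ PySem.Str.join "、" names.dropLast ++ "和" ++ names.getLastD ""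

-- ===== PRECONDITION & SPEC =====
-- Pre_ excludes exactly the inputs where Python A raises KeyError (some item lacks the
-- key selected by Category); B raises KeyError there as well.
def Pre_optimized_answer_format (answer : String) (answer_content : List (List (String × String))) (Category : String) : Prop :=
  ∀ item ∈ answer_content,
    (PySem.Dict.mk item).contains
      (if Category = "电影的编剧" ∨ Category = "电影的主演" then "p.Ch_Name"
       else if Category = "电影的类型" then "n.Name"
       else "m.Name") = true
instance (answer : String) (answer_content : List (List (String × String))) (Category : String) : Decidable (Pre_optimized_answer_format answer answer_content Category) := by unfold Pre_optimized_answer_format; infer_instance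

def pvWitness_optimized_answer_format : String × (List (List (String × String))) × String :=
  ("The movie is ", [[("m.Name", "A")], [("m.Name", "B")], [("m.Name", "C")]], "misc")

def Spec_optimized_answer_format (answer : String) (answer_content : List (List (String × String))) (Category : String) (out : String) : Prop := out = optimized_answer_format_alt answer answer_content Category
instance (answer : String) (answer_content : List (List (String × String))) (Category : String) (out : String) : Decidable (Spec_optimized_answer_format answer answer_content Category out) := by unfold Spec_optimized_answer_format; infer_instance

-- ===== CLAIM (what is proved, stated in full; the proofs are below) =====
def Claim_equal_optimized_answer_format : Prop := ∀ (answer : String) (answer_content : List (List (String × String))) (Category : String), Dom_optimized_answer_format answer answer_content Category → Pre_optimized_answer_format answer answer_content Category → Spec_optimized_answer_format answer answer_content Category (optimized_answer_format answer answer_content Category)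

-- ===== LEMMAS AND PROOFS =====
lemma pv_join_singleton (sep a : String) : PySem.Str.join sep [a] = a := by
  apply String.toList_injective
  simp [PySem.Str.toList_join, PySem.Chars.join, List.intercalate]

lemma pv_join_cons_cons (sep a b : String) (l : List String) :
    PySem.Str.join sep (a :: b :: l) = a ++ sep ++ PySem.Str.join sep (b :: l) := by
  apply String.toList_injective
  simp [PySem.Str.toList_join, PySem.Chars.join_cons_cons]

-- The loop on a list of length ≥ 2 starting at index i = n - length.
lemma pvLoopA_two_plus (key : String) :
    ∀ (xs : List (List (String × String))) (y : List (String × String))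
      (x : List (String × String)) (acc : String) (n i : Nat),
      i + (x :: y :: xs).length = n →
      pvLoopA key n acc i (x :: y :: xs) =
        acc ++ PySem.Str.join "、" ((x :: y :: xs).map (fun item => PySem.Dict.getD (PySem.Dict.mk item) key "")).dropLast
            ++ "和"
            ++ (((x :: y :: xs).map (fun item => PySem.Dict.getD (PySem.Dict.mk item) key "")).getLastD "") := by
  intro xs
  induction xs with
  | nil =>
      intro y x acc n i h
      simp only [List.length] at h
      have hn : n = i + 2 := by omega
      subst hn
      simp [pvLoopA, pv_join_singleton, String.append_assoc]
  | cons z zs ih =>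
      intro y x acc n i h
      have h1 : ¬ (i = n - 1) := by simp only [List.length] at h ⊢; omega
      have h2 : ¬ (i = n - 2) := by simp only [List.length] at h ⊢; omega
      have h' : (i + 1) + (y :: z :: zs).length = n := by simp only [List.length] at h ⊢; omega
      have step : pvLoopA key n acc i (x :: y :: z :: zs) =
          pvLoopA key n (acc ++ (PySem.Dict.getD (PySem.Dict.mk x) key "" ++ "、")) (i + 1) (y :: z :: zs) := by
        simp only [pvLoopA, h1, h2, if_false]
      rw [step, ih z y _ n (i + 1) h']
      have hdl : ((x :: y :: z :: zs).map (fun item => PySem.Dict.getD (PySem.Dict.mk item) key "")).dropLast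
          = PySem.Dict.getD (PySem.Dict.mk x) key ""
            :: ((y :: z :: zs).map (fun item => PySem.Dict.getD (PySem.Dict.mk item) key "")).dropLast := by
        simp
      rw [hdl]
      have hdl2 :((y :: z :: zs).map (fun item => PySem.Dict.getD (PySem.Dict.mk item) key "")).dropLast
          = PySem.Dict.getD (PySem.Dict.mk y) key ""
            :: ((z :: zs).map (fun item => PySem.Dict.getD (PySem.Dict.mk item) key "")).dropLast := by
        simp
      rw [hdl2, pv_join_cons_cons]
      simp [List.getLastD, String.append_assoc]

-- The loop equals B's join formulation, for any fixed key.
lemma pvLoopA_eq (key : String) (xs : List (List (String × String))) (acc : String) :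
    pvLoopA key xs.length acc 0 xs =
      (let names := xs.map (fun item => PySem.Dict.getD (PySem.Dict.mk item) key "")
       if names.isEmpty then acc
       else if names.length == 1 then acc ++ names.headD ""
       else acc ++ PySem.Str.join "、" names.dropLast ++ "和" ++ names.getLastD "") := by
  match xs with
  | [] => simp [pvLoopA]
  | [x] => simp [pvLoopA]
  | x :: y :: rest =>
      rw [pvLoopA_two_plus key rest y x acc (x :: y :: rest).length 0 (by simp)]
      simp [List.isEmpty, String.append_assoc]

-- ===== VERDICT (by name: the statement is the Claim_ definition above) =====
theorem optimized_answer_format_spec : Claim_equal_optimized_answer_format := by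
  intro answer answer_content Category _ _
  unfold Spec_optimized_answer_format optimized_answer_format optimized_answer_format_alt
  by_cases h1 : (Category == "电影的编剧" || Category == "电影的主演") = true
  · simp only [h1, if_true]
    exact pvLoopA_eq "p.Ch_Name" answer_content answer
  · by_cases h2 : (Category == "电影的类型") = true
    · simp only [h1, h2, if_true, if_false, Bool.false_eq_true]
      exact pvLoopA_eq "n.Name" answer_content answer
    · simp only [h1, h2, if_false, Bool.false_eq_true]
      exact pvLoopA_eq "m.Name" answer_content answer
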